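-- pv_equiv track=rewrite | github.com/nicholasbarnfield/ZMCode | ZM.py | compute_ZM_len
-- ===== SOURCE A (Python) =====
-- def compute_ZM_len(y, x, mZM=True):
--     """
--     Compute the number of words C in ZM-type parsings of y using x.
--
--     Inputs:
--         y (str): The first string.
--         x (str): The second string, possibly of different length.
--         mZM (bool, optional): If True, proceeds with the modified ZM parsing.
--                               If False, proceeds with the original ZM parsing.
--                               Defaults to True.
--
--     Outputs:
--         float: The number of words C.
--     """
--
--     C, j, i = 1, 0, 0
--     N = len(y)
--     if mZM:
--         N -=1
--
--     while j < N:
--         if y[i:j+1] in x: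
--             j += 1
--         else:
--             C += 1
--             if mZM:
--                 j += 1
--             else:
--                 if i == j: # to handle the case where supp y is not in supp x
--                     j += 1
--             i = j
--     return C
-- ===== SOURCE B (Python) =====
-- def compute_ZM_len(y, x, mZM=True):
--     """Count words in the (modified) ZM parsing of y over x, keeping the list of
--     occurrence positions of the current word in x instead of re-searching x for
--     the whole growing word at every step."""
--     n = len(x)
--     allpos = list(range(n))
--     N = len(y) - 1 if mZM else len(y)
--     C, occ, L = 1, allpos, 0
--     for c in y[:N]:
--         ext = [p for p in occ if p + L < n and x[p + L] == c]
--         if ext: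
--             occ, L = ext, L + 1
--         elif mZM or L == 0:
--             C, occ, L = C + 1, allpos, 0
--         else:
--             C += 1
--             ext1 = [p for p in allpos if x[p] == c]
--             if ext1:
--                 occ, L = ext1, 1
--             else:
--                 C, occ, L = C + 1, allpos, 0
--     return C
-- ===== Notes on version B (the rewrite author's own statement) =====
-- stated objective: alternative
-- what changed: Instead of re-searching x for the whole growing current word at every character (y[i:j+1] in x), B maintains the list of occurrence positions of the current word in x and filters it by one character per step, scanning y once with no index bookkeeping.
import Mathlib
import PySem

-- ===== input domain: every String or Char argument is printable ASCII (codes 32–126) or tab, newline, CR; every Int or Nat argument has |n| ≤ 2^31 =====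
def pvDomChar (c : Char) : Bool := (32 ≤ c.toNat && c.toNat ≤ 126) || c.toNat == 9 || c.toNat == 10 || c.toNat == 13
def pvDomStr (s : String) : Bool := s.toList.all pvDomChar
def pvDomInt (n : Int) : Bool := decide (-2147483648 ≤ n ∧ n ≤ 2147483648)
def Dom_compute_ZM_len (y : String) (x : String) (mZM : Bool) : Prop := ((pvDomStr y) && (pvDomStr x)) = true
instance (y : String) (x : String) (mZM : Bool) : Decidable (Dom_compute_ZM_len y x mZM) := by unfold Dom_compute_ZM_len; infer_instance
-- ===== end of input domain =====

-- B replaces A's repeated substring search of the growing current word in x by an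
-- incrementally maintained list of the word's occurrence positions in x (objective: alternative).

-- ===== PORT A =====
-- A's while loop, state (C, j, i); y[i:j+1] in x is Chars.isIn of the slice.
-- fuel only makes the loop total (each iteration consumes one unit); 2*max(N,0)+1 units
-- always suffice, as zm_loop below proves for every state the loop reaches.
def zmA (y x : List Char) (mZM : Bool) (N : Int) : Nat → Int → Int → Int → Int
  | 0, C, _, _ => C
  | fuel + 1, C, j, i =>
    if j < N then
      if PySem.Chars.isIn (PySem.List.slice y (some i) (some (j + 1))) x then
        zmA y x mZM N fuel C (j + 1) i
      else
        if mZM then zmA y x mZM N fuel (C + 1) (j + 1) (j + 1)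
        else
          if i = j then zmA y x mZM N fuel (C + 1) (j + 1) (j + 1)
          else zmA y x mZM N fuel (C + 1) j j
    else C

def compute_ZM_len (y : String) (x : String) (mZM : Bool) : Int :=
  zmA y.toList x.toList mZM (PySem.Str.len y - (if mZM then 1 else 0))
    (2 * (PySem.Str.len y - (if mZM then 1 else 0)).toNat + 1) 1 0 0

-- ===== PORT B =====
-- one step of B's for-loop; state (C, occ, L): occ = occurrence positions of the current word in x, L its length
def zmStep (x : List Char) (n : Int) (allpos : List Int) (mZM : Bool)
    (st : Int × List Int × Int) (c : Char) : Int × List Int × Int :=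
  let ext := st.2.1.filter (fun p => decide (p + st.2.2 < n) && (PySem.List.pyGetD x (p + st.2.2) default == c))
  if ext ≠ [] then (st.1, ext, st.2.2 + 1)
  else
    if mZM || st.2.2 == 0 then (st.1 + 1, allpos, 0)
    else
      let ext1 := allpos.filter (fun p => PySem.List.pyGetD x p default == c)
      if ext1 ≠ [] then (st.1 + 1, ext1, 1)
      else (st.1 + 1 + 1, allpos, 0)

def compute_ZM_len_alt (y : String) (x : String) (mZM : Bool) : Int :=
  let n := PySem.Str.len x
  let allpos := PySem.List.pyRange 0 n 1
  let N := PySem.Str.len y - (if mZM then 1 else 0)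
  ((PySem.List.slice y.toList none (some N)).foldl (zmStep x.toList n allpos mZM) (1, allpos, 0)).1

-- ===== PRECONDITION & SPEC =====
def Spec_compute_ZM_len (y : String) (x : String) (mZM : Bool) (out : Int) : Prop := out = compute_ZM_len_alt y x mZM
instance (y : String) (x : String) (mZM : Bool) (out : Int) : Decidable (Spec_compute_ZM_len y x mZM out) := by unfold Spec_compute_ZM_len; infer_instance

-- ===== CLAIM (what is proved, stated in full; the proofs are below) =====
def Claim_equal_compute_ZM_len : Prop := ∀ (y : String) (x : String) (mZM : Bool), Dom_compute_ZM_len y x mZM → Spec_compute_ZM_len y x mZM (compute_ZM_len y x mZM)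

-- ===== LEMMAS AND PROOFS =====

-- p is an occurrence position of w in x (B's loop invariant: occ = occOf x w)
def matchB (x : List Char) (w : List Char) (p : Int) : Bool :=
  (x.drop p.toNat).take w.length == w

def occOf (x : List Char) (w : List Char) : List Int :=
  (PySem.List.pyRange 0 (x.length : Int) 1).filter (matchB x w)

lemma occOf_nil (x : List Char) : occOf x [] = PySem.List.pyRange 0 (x.length : Int) 1 := by
  unfold occOf
  have h : ∀ p : Int, matchB x [] p = true := by intro p; simp [matchB]
  simp [List.filter_eq_self.mpr (fun p _ => h p)]

-- pointwise filter step: extending the word by one character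
lemma matchB_snoc (x w : List Char) (c : Char) (p : Int) (hp : 0 ≤ p) (hpn : p < (x.length : Int)) :
    matchB x (w ++ [c]) p
      = (matchB x w p && (decide (p + (w.length : Int) < (x.length : Int))
          && (PySem.List.pyGetD x (p + (w.length : Int)) default == c))) := by
  unfold matchB
  rw [show (w ++ [c]).length = w.length + 1 from by simp]
  by_cases h : p.toNat + w.length < x.length
  · have hcast : p + (w.length : Int) = ((p.toNat + w.length : Nat) : Int) := by omega
    have hget : PySem.List.pyGetD x (p + (w.length : Int)) default = x[p.toNat + w.length] := by
      rw [hcast, PySem.List.pyGetD_natCast, List.getD_eq_getElem x default h]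
    have hdec : decide (p + (w.length : Int) < (x.length : Int)) = true := by
      simp only [decide_eq_true_eq]; omega
    have hdropped : (x.drop p.toNat)[w.length]? = some (x[p.toNat + w.length]'h) := by
      rw [List.getElem?_drop, List.getElem?_eq_getElem h]
    rw [Bool.eq_iff_iff]
    simp only [List.take_add_one, hdropped, Option.toList_some, hget, hdec, Bool.true_and,
      Bool.and_eq_true, beq_iff_eq]
    
    constructor
    · intro heq
      have hlen : ([x[p.toNat + w.length]'h] : List Char).length = ([c] : List Char).length := by simp
      obtain ⟨h1, h2⟩ := List.append_inj' heq hlen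
      exact ⟨h1, by simpa using h2⟩
    · rintro ⟨h1, h2⟩; rw [h1, h2]
  · have hdec : decide (p + (w.length : Int) < (x.length : Int)) = false := by
      simp only [decide_eq_false_iff_not]; omega
    rw [Bool.eq_iff_iff]
    simp only [hdec, Bool.false_and, Bool.and_false, beq_iff_eq]
    constructor
    · intro heq
      have := congrArg List.length heq
      simp only [List.length_take, List.length_drop, List.length_append, List.length_cons,
        List.length_nil] at this
      omega
    · intro hfalse; exact absurd hfalse (by simp)

lemma occOf_step (x w : List Char) (c : Char) :
    (occOf x w).filter
        (fun p => decide (p + (w.length : Int) < (x.length : Int))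
          && (PySem.List.pyGetD x (p + (w.length : Int)) default == c))
      = occOf x (w ++ [c]) := by
  unfold occOf
  rw [List.filter_filter]
  apply List.filter_congr
  intro p hp
  rw [PySem.List.mem_pyRange_one] at hp
  rw [matchB_snoc x w c p hp.1 hp.2, Bool.and_comm]

lemma occOf_single (x : List Char) (c : Char) :
    (PySem.List.pyRange 0 (x.length : Int) 1).filter
        (fun p => PySem.List.pyGetD x p default == c)
      = occOf x [c] := by
  unfold occOf
  apply List.filter_congr
  intro p hp
  rw [PySem.List.mem_pyRange_one] at hp
  have h := matchB_snoc x [] c p hp.1 hp.2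
  simp only [List.nil_append, List.length_nil, Nat.cast_zero, add_zero] at h
  rw [h]
  have hm : matchB x [] p = true := by simp [matchB]
  have hd : decide (p < (x.length : Int)) = true := by
    simp only [decide_eq_true_eq]; omega
  rw [hm, hd]
  simp

-- nonemptiness of the occurrence list is Python's substring test
lemma occOf_ne_nil_iff (x w : List Char) (hw : w ≠ []) :
    (occOf x w ≠ []) ↔ PySem.Chars.isIn w x = true := by
  rw [PySem.Chars.isIn_iff_infix]
  constructor
  · intro h
    obtain ⟨p, hp⟩ := List.exists_mem_of_ne_nil _ h
    rw [occOf, List.mem_filter, PySem.List.mem_pyRange_one] at hp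
    obtain ⟨⟨hp0, hpn⟩, hm⟩ := hp
    rw [matchB, beq_iff_eq] at hm
    refine ⟨x.take p.toNat, (x.drop p.toNat).drop w.length, ?_⟩
    conv_rhs => rw [← List.take_append_drop p.toNat x,
      ← List.take_append_drop w.length (x.drop p.toNat)]
    rw [hm, List.append_assoc]
  · rintro ⟨s, t, hst⟩
    have hlen : x.length = s.length + w.length + t.length := by
      have h := congrArg List.length hst
      simp only [List.length_append] at h
      omega
    have hw1 : 1 ≤ w.length := by
      cases w with
      | nil => exact absurd rfl hw
      | cons a l => simp
    have hmem : ((s.length : Int)) ∈ occOf x w := by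
      rw [occOf, List.mem_filter, PySem.List.mem_pyRange_one]
      refine ⟨⟨by positivity, by exact_mod_cast (by omega : s.length < x.length)⟩, ?_⟩
      rw [matchB, Int.toNat_natCast, ← hst, List.append_assoc, List.drop_left, beq_iff_eq]
      exact List.take_left
    exact List.ne_nil_of_mem hmem

-- A's slice y[i:j+1] is the current word extended by y[j]
lemma word_snoc (y : List Char) (i j : Nat) (hij : i ≤ j) (hj : j < y.length) :
    (y.drop i).take (j + 1 - i) = (y.drop i).take (j - i) ++ [y[j]] := by
  have h1 : j + 1 - i = (j - i) + 1 := by omega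
  have h2 : (y.drop i)[j - i]? = some (y[j]'hj) := by
    rw [List.getElem?_drop]
    have h3 : i + (j - i) = j := by omega
    rw [h3, List.getElem?_eq_getElem hj]
  rw [h1, List.take_add_one, h2, Option.toList_some]

lemma slice_snoc (y : List Char) (i j : Nat) (hij : i ≤ j) (hj : j < y.length) :
    PySem.List.slice y (some (i : Int)) (some ((j : Int) + 1))
      = (y.drop i).take (j - i) ++ [y[j]] := by
  have hc : ((j : Int) + 1) = ((j + 1 : Nat) : Int) := by push_cast; ring
  rw [hc, PySem.List.slice_natCast, word_snoc y i j hij hj]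

lemma word_len (y : List Char) (i j : Nat) (hij : i ≤ j) (hj : j ≤ y.length) :
    ((y.drop i).take (j - i)).length = j - i := by
  simp only [List.length_take, List.length_drop]
  omega

lemma zm_loop (y x : List Char) (mZM : Bool) (N : Nat) (hN : N ≤ y.length) :
    ∀ n j i C fuel, i ≤ j → j ≤ N → N - j = n →
      2 * (N - j) + (if i = j then 0 else 1) < fuel →
      zmA y x mZM (N : Int) fuel C (j : Int) (i : Int)
        = (((y.take N).drop j).foldl
            (zmStep x (x.length : Int) (PySem.List.pyRange 0 (x.length : Int) 1) mZM)
            (C, occOf x ((y.drop i).take (j - i)), ((j - i : Nat) : Int))).1 := by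
  intro n
  induction n with
  | zero =>
    intro j i C fuel hij hjN hnj hfuel
    have hj : j = N := by omega
    subst hj
    obtain ⟨f, rfl⟩ : ∃ f, fuel = f + 1 := ⟨fuel - 1, by omega⟩
    simp only [zmA]
    have hlt : ¬ ((j : Int) < (j : Int)) := by omega
    rw [if_neg hlt]
    have hd : (y.take j).drop j = [] := by
      apply List.drop_eq_nil_of_le
      simp [List.length_take]
    rw [hd, List.foldl_nil]
  | succ m ih =>
    intro j i C fuel hij hjN hnj hfuel
    have hjN' : j < N := by omega
    have hf0 : 2 * (N - j) < fuel := by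
      have he : 0 ≤ (if i = j then 0 else 1) := by split_ifs <;> omega
      omega
    obtain ⟨f, rfl⟩ : ∃ f, fuel = f + 1 := ⟨fuel - 1, by omega⟩
    have hff : 2 * (N - j) ≤ f := by omega
    have hjy : j < y.length := lt_of_lt_of_le hjN' hN
    have hlt : (j : Int) < (N : Int) := by exact_mod_cast hjN'
    have h1 : j < (y.take N).length := by simp only [List.length_take]; omega
    have hcons : (y.take N).drop j = y[j] :: (y.take N).drop (j + 1) := by
      rw [List.drop_eq_getElem_cons h1, List.getElem_take]
    set w := (y.drop i).take (j - i) with hwdef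
    have hwlen : w.length = j - i := word_len y i j hij (le_of_lt hjy)
    set c := y[j]'hjy with hcdef
    have hword1 : (y.drop i).take (j + 1 - i) = w ++ [c] := word_snoc y i j hij hjy
    have hslice : PySem.List.slice y (some (i : Int)) (some ((j : Int) + 1)) = w ++ [c] :=
      slice_snoc y i j hij hjy
    have hLcast : ((j - i : Nat) : Int) = (w.length : Int) := by rw [hwlen]
    have hext : (occOf x w).filter
        (fun p => decide (p + ((j - i : Nat) : Int) < (x.length : Int))
          && (PySem.List.pyGetD x (p + ((j - i : Nat) : Int)) default == c))
        = occOf x (w ++ [c]) := by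
      rw [hLcast]; exact occOf_step x w c
    have hnenil : (w ++ [c]) ≠ [] := by simp
    have hiff := occOf_ne_nil_iff x (w ++ [c]) hnenil
    simp only [zmA]
    rw [if_pos hlt, hslice, hcons, List.foldl_cons]
    have hj1 : (j : Int) + 1 = ((j + 1 : Nat) : Int) := by push_cast; ring
    have hzero : ((j + 1 - (j + 1) : Nat) : Int) = 0 := by norm_num
    have hselfword : (y.drop (j + 1)).take (j + 1 - (j + 1)) = ([] : List Char) := by simp
    by_cases hin : PySem.Chars.isIn (w ++ [c]) x = true
    · rw [if_pos hin]
      have hstep : zmStep x (x.length : Int) (PySem.List.pyRange 0 (x.length : Int) 1) mZM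
          (C, occOf x w, ((j - i : Nat) : Int)) c
          = (C, occOf x (w ++ [c]), ((j - i : Nat) : Int) + 1) := by
        simp only [zmStep, hext]
        rw [if_pos (hiff.mpr hin)]
      rw [hstep]
      have hL1 : ((j - i : Nat) : Int) + 1 = ((j + 1 - i : Nat) : Int) := by
        push_cast [hij]; omega
      rw [hj1, hL1]
      have hrec := ih (j + 1) i C f (by omega) (by omega) (by omega)
        (by split_ifs <;> omega)
      rw [hword1] at hrec
      exact hrec
    · rw [if_neg hin]
      have hextnil : occOf x (w ++ [c]) = [] := by
        by_contra hne
        exact hin (hiff.mp hne)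
      by_cases hm : mZM = true
      · rw [if_pos hm]
        have hstep : zmStep x (x.length : Int) (PySem.List.pyRange 0 (x.length : Int) 1) mZM
            (C, occOf x w, ((j - i : Nat) : Int)) c
            = (C + 1, PySem.List.pyRange 0 (x.length : Int) 1, 0) := by
          simp only [zmStep, hext, hextnil]
          rw [if_neg (by simp), if_pos (by simp [hm])]
        rw [hstep, hj1]
        have hrec := ih (j + 1) (j + 1) (C + 1) f (le_refl _) (by omega) (by omega)
          (by split_ifs <;> omega)
        rw [hselfword, occOf_nil, hzero] at hrec
        exact hrec
      · rw [if_neg hm]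
        by_cases hij' : i = j
        · rw [if_pos (by exact_mod_cast hij')]
          have hL0 : ((j - i : Nat) : Int) = 0 := by subst hij'; simp
          have hstep : zmStep x (x.length : Int) (PySem.List.pyRange 0 (x.length : Int) 1) mZM
              (C, occOf x w, ((j - i : Nat) : Int)) c
              = (C + 1, PySem.List.pyRange 0 (x.length : Int) 1, 0) := by
            simp only [zmStep, hext, hextnil]
            rw [if_neg (by simp), if_pos (by simp [hL0])]
          rw [hstep, hj1]
          have hrec := ih (j + 1) (j + 1) (C + 1) f (le_refl _) (by omega) (by omega)
            (by split_ifs <;> omega)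
          rw [hselfword, occOf_nil, hzero] at hrec
          exact hrec
        · rw [if_neg (by intro h; exact hij' (by exact_mod_cast h))]
          have hiltj : i < j := lt_of_le_of_ne hij hij'
          have hfe : (if i = j then 0 else 1) = 1 := if_neg hij'
          rw [hfe] at hfuel
          obtain ⟨f2, rfl⟩ : ∃ f2, f = f2 + 1 := ⟨f - 1, by omega⟩
          have hL0 : (((j - i : Nat) : Int) == 0) = false := by
            simp only [beq_eq_false_iff_ne, ne_eq]
            intro h
            have h2 : j - i = 0 := by exact_mod_cast h
            omega
          have hext1 : (PySem.List.pyRange 0 (x.length : Int) 1).filter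
              (fun p => PySem.List.pyGetD x p default == c) = occOf x [c] :=
            occOf_single x c
          simp only [zmA]
          rw [if_pos hlt]
          have hslice2 : PySem.List.slice y (some (j : Int)) (some ((j : Int) + 1)) = [c] := by
            have h3 := slice_snoc y j j (le_refl j) hjy
            simpa using h3
          rw [hslice2]
          have hcne : ([c] : List Char) ≠ [] := by simp
          have hiff1 := occOf_ne_nil_iff x [c] hcne
          by_cases hc1 : PySem.Chars.isIn [c] x = true
          · rw [if_pos hc1]
            have hstep : zmStep x (x.length : Int) (PySem.List.pyRange 0 (x.length : Int) 1) mZM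
                (C, occOf x w, ((j - i : Nat) : Int)) c
                = (C + 1, occOf x [c], 1) := by
              simp only [zmStep, hext, hextnil]
              rw [if_neg (by simp), if_neg (by simp [hm, hL0]), hext1,
                if_pos (hiff1.mpr hc1)]
            rw [hstep, hj1]
            have hrec := ih (j + 1) j (C + 1) f2 (by omega) (by omega) (by omega)
              (by split_ifs <;> omega)
            have hword2 : (y.drop j).take (j + 1 - j) = [c] := by
              have h4 := word_snoc y j j (le_refl j) hjy
              simpa using h4
            rw [hword2] at hrec
            rw [show ((j + 1 - j : Nat) : Int) = 1 by norm_num] at hrec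
            exact hrec
          · rw [if_neg hc1, if_neg hm]
            simp only [if_true]
            have hext1nil : occOf x [c] = [] := by
              by_contra hne
              exact hc1 (hiff1.mp hne)
            have hstep : zmStep x (x.length : Int) (PySem.List.pyRange 0 (x.length : Int) 1) mZM
                (C, occOf x w, ((j - i : Nat) : Int)) c
                = (C + 1 + 1, PySem.List.pyRange 0 (x.length : Int) 1, 0) := by
              simp only [zmStep, hext, hextnil]
              rw [if_neg (by simp), if_neg (by simp [hm, hL0]), hext1,
                if_neg (by simp [hext1nil])]
            rw [hstep, hj1]
            have hrec := ih (j + 1) (j + 1) (C + 1 + 1) f2 (le_refl _) (by omega) (by omega)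
              (by split_ifs <;> omega)
            rw [hselfword, occOf_nil, hzero] at hrec
            exact hrec

theorem compute_ZM_len_spec : Claim_equal_compute_ZM_len := by
  intro y x mZM _
  unfold Spec_compute_ZM_len compute_ZM_len compute_ZM_len_alt
  simp only [PySem.Str.len_eq]
  by_cases hy : y.toList = []
  · rw [hy]
    have hslice : PySem.List.slice ([] : List Char) none
        (some (((([] : List Char).length : Int)) - (if mZM then 1 else 0))) = [] := by
      cases mZM <;> simp [PySem.List.slice]
    rw [hslice, List.foldl_nil]
    simp only [zmA]
    have hneg : ¬ ((0 : Int) < (([] : List Char).length : Int) - (if mZM then 1 else 0)) := by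
      cases mZM <;> simp
    rw [if_neg hneg]
  · have hpos : 0 < y.toList.length := List.length_pos_of_ne_nil hy
    have main : ∀ NN : Nat, NN ≤ y.toList.length →
        zmA y.toList x.toList mZM (NN : Int) (2 * NN + 1) 1 0 0
          = (List.foldl
              (zmStep x.toList (x.toList.length : Int)
                (PySem.List.pyRange 0 (x.toList.length : Int) 1) mZM)
              (1, PySem.List.pyRange 0 (x.toList.length : Int) 1, 0)
              (y.toList.take NN)).1 := by
      intro NN hNle
      have hmain := zm_loop y.toList x.toList mZM NN hNle (NN - 0) 0 0 1 (2 * NN + 1)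
        (le_refl 0) (Nat.zero_le NN) rfl (by split_ifs <;> omega)
      simp only [Nat.sub_zero, List.drop_zero, List.take_zero, Nat.cast_zero] at hmain
      rw [occOf_nil] at hmain
      exact hmain
    cases mZM
    · rw [if_neg (by decide), sub_zero, PySem.List.slice_to_natCast, Int.toNat_natCast]
      exact main y.toList.length (le_refl _)
    · rw [if_pos rfl]
      have hc : (y.toList.length : Int) - 1 = ((y.toList.length - 1 : Nat) : Int) := by omega
      rw [hc, PySem.List.slice_to_natCast, Int.toNat_natCast]
      exact main (y.toList.length - 1) (by omega)
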